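-- pv_equiv track=rewrite | github.com/OpenCTI-Platform/connectors | taxii2/src/taxii2.py | _init_collection_table
-- ===== SOURCE A (Python) =====
-- def _init_collection_table(colls):
--     """
--     Creates a table of string:Set where the key is the API root
--     and the value is the list of Collections to read
--
--     Args:
--         colls (str): a comma delimited list of API
--                      roots and Collections to Poll
--     Returns:
--         A dictionary with [str, Set], where the Key is the API root
--         and the value is the list of Collections to be polled
--     """
--     table = {}
--     for col in colls.split(","):
--         root, coll = col.split(".")
--         if root in table:
--             table[root].add(coll)
--         else:
--             table[root] = {coll}
--
--     return table
-- ===== SOURCE B (Python) =====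
-- def _init_collection_table(colls):
--     pairs = []
--     for col in colls.split(","):
--         root, coll = col.split(".")
--         pairs.append((root, coll))
--     return {root: {c for r, c in pairs if r == root} for root, _ in pairs}
-- ===== Notes on version B (the rewrite author's own statement) =====
-- stated objective: alternative
-- what changed: Replaces the single-pass dict-of-sets accumulation with a parse pass producing a (root, coll) pair list followed by a dict comprehension that groups each root's collections by filtering the pair list.
import Mathlib
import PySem

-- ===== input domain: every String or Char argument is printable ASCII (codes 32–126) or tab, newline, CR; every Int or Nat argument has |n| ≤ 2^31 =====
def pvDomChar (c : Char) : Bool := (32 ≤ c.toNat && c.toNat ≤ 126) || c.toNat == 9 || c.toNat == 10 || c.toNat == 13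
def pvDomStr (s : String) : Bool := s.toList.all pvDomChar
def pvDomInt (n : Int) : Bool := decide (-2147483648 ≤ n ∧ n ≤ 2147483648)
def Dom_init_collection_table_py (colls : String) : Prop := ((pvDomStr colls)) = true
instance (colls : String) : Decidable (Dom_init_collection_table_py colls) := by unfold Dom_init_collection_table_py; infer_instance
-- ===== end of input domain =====

-- B groups a parsed (root, coll) pair list with a dict comprehension instead of A's incremental dict-of-sets accumulation; return values proved equal wherever A returns.

-- ===== PORT A =====
def init_collection_table_py (colls : String) : List (String × List String) :=
  ((((PySem.Str.split? colls ",").getD [])).foldl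
    (fun (table : PySem.Dict String (PySem.Set String)) col =>
      match ((PySem.Str.split? col ".").getD []) with
      | [root, coll] =>
          if table.contains root then
            table.insert root (PySem.Set.add (table.getD root PySem.Set.empty) coll)
          else
            table.insert root (PySem.Set.ofList [coll])
      | _ => table)  -- Python raises ValueError here; excluded by Pre_
    PySem.Dict.empty).items

-- ===== PORT B =====
def pvParse (col : String) : String × String :=
  let parts := (PySem.Str.split? col ".").getD []
  (parts.getD 0 "", parts.getD 1 "")  -- = the 2-tuple unpack; Python raises ValueError off Pre_

def init_collection_table_py_alt (colls : String) : List (String × List String) :=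
  let pairs := (((PySem.Str.split? colls ",").getD [])).map pvParse
  (pairs.foldl
    (fun (d : PySem.Dict String (PySem.Set String)) p =>
      d.insert p.1 (PySem.Set.ofList ((pairs.filter (fun q => q.1 == p.1)).map (·.2))))
    PySem.Dict.empty).items

-- ===== PRECONDITION & SPEC =====
-- Pre_: every comma segment splits on "." into exactly two parts; elsewhere Python's tuple unpack raises ValueError.
def Pre_init_collection_table_py (colls : String) : Prop :=
  ∀ seg ∈ ((PySem.Str.split? colls ",").getD []), (((PySem.Str.split? seg ".").getD [])).length = 2
instance (colls : String) : Decidable (Pre_init_collection_table_py colls) := by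
  unfold Pre_init_collection_table_py; infer_instance
def pvWitness_init_collection_table_py : String := "a.b,a.c,d.e"
def Spec_init_collection_table_py (colls : String) (out : List (String × List String)) : Prop := out = init_collection_table_py_alt colls
instance (colls : String) (out : List (String × List String)) : Decidable (Spec_init_collection_table_py colls out) := by unfold Spec_init_collection_table_py; infer_instance

-- ===== CLAIM (what is proved, stated in full; the proofs are below) =====
def Claim_equal_init_collection_table_py : Prop := ∀ (colls : String), Dom_init_collection_table_py colls → Pre_init_collection_table_py colls → Spec_init_collection_table_py colls (init_collection_table_py colls)

-- ===== LEMMAS AND PROOFS =====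

-- A's loop body written over the parsed pair, both branches unified into one insert.
def pvStepA (t : PySem.Dict String (PySem.Set String)) (p : String × String) :
    PySem.Dict String (PySem.Set String) :=
  t.insert p.1 (PySem.Set.add (t.getD p.1 PySem.Set.empty) p.2)

lemma pvStepA_eq (t : PySem.Dict String (PySem.Set String)) (p : String × String) :
    (if t.contains p.1 then
        t.insert p.1 (PySem.Set.add (t.getD p.1 PySem.Set.empty) p.2)
      else t.insert p.1 (PySem.Set.ofList [p.2])) = pvStepA t p := by
  unfold pvStepA
  by_cases h : t.contains p.1 = true
  · simp [h]
  · simp only [Bool.not_eq_true] at h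
    rw [if_neg (by simp [h]), PySem.Dict.getD_of_not_contains t PySem.Set.empty h]
    simp [PySem.Set.add, PySem.Set.ofList, PySem.Set.empty, PySem.Set.contains]

lemma pvA_getD (l : List (String × String)) (d : PySem.Dict String (PySem.Set String))
    (r : String) :
    (l.foldl pvStepA d).getD r PySem.Set.empty =
      PySem.Set.update (d.getD r PySem.Set.empty) ((l.filter (fun p => p.1 == r)).map (·.2)) := by
  induction l generalizing d with
  | nil => simp [PySem.Set.update]
  | cons p l ih =>
      simp only [List.foldl_cons, ih, List.filter_cons, pvStepA, PySem.Dict.getD_insert]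
      by_cases h : p.1 = r
      · subst h
        simp [PySem.Set.update]
      · have : (p.1 == r) = false := by simp [h]
        have hrp : ¬ r = p.1 := fun e => h e.symm
        simp [this, hrp]

lemma pvB_getD (g : String → PySem.Set String) (l : List (String × String))
    (d : PySem.Dict String (PySem.Set String)) (r : String) :
    (l.foldl (fun d p => d.insert p.1 (g p.1)) d).getD r PySem.Set.empty =
      if r ∈ l.map (·.1) then g r else d.getD r PySem.Set.empty := by
  induction l generalizing d with
  | nil => simp
  | cons p l ih =>
      simp only [List.foldl_cons, ih, List.map_cons, List.mem_cons, PySem.Dict.getD_insert]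
      by_cases h : r ∈ l.map (·.1)
      · simp [h]
      · by_cases hr : r = p.1
        · subst hr; simp [h]
        · simp [h, hr]


-- ===== VERDICT (by name: the statement is the Claim_ definition above) =====
theorem init_collection_table_py_spec : Claim_equal_init_collection_table_py := by
  intro colls _hdom hpre
  unfold Spec_init_collection_table_py init_collection_table_py init_collection_table_py_alt
  set segs := ((PySem.Str.split? colls ",").getD []) with hsegs
  set pairs := segs.map pvParse with hpairs
  -- rewrite A's fold over segments as the fold of pvStepA over the parsed pairs
  have hA : (segs.foldl
      (fun (table : PySem.Dict String (PySem.Set String)) col =>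
        match ((PySem.Str.split? col ".").getD []) with
        | [root, coll] =>
            if table.contains root then
              table.insert root (PySem.Set.add (table.getD root PySem.Set.empty) coll)
            else table.insert root (PySem.Set.ofList [coll])
        | _ => table) PySem.Dict.empty)
      = pairs.foldl pvStepA PySem.Dict.empty := by
    rw [hpairs, List.foldl_map]
    apply PySem.List.foldl_congr_mem
    intro t seg hseg
    have h2 := hpre seg (hsegs ▸ hseg)
    match hm : ((PySem.Str.split? seg ".").getD []) with
    | [a, b] =>
        simp only [pvParse, hm, List.getD]
        exact pvStepA_eq t (a, b)
    | [] => rw [hm] at h2; simp at h2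
    | [a] => rw [hm] at h2; simp at h2
    | a :: b :: c :: rest => rw [hm] at h2; simp at h2
  rw [hA]
  -- compare the two dicts item-wise
  set g : String → PySem.Set String :=
    fun r => PySem.Set.ofList ((pairs.filter (fun q => q.1 == r)).map (·.2)) with hg
  have hkA : (pairs.foldl pvStepA PySem.Dict.empty).keys
      = PySem.Set.ofList (pairs.map (·.1)) := by
    have := PySem.Dict.keys_foldl_insert_key pairs (fun p : String × String => p.1)
      (fun d p => PySem.Set.add (d.getD p.1 PySem.Set.empty) p.2) PySem.Dict.empty
    simpa [pvStepA, PySem.Set.update, PySem.Set.ofList, PySem.Dict.keys_empty] using this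
  have hkB : (pairs.foldl (fun d p => d.insert p.1 (g p.1)) PySem.Dict.empty).keys
      = PySem.Set.ofList (pairs.map (·.1)) := by
    have := PySem.Dict.keys_foldl_insert_key pairs (fun p : String × String => p.1)
      (fun d p => g p.1) PySem.Dict.empty
    simpa [PySem.Set.update, PySem.Set.ofList, PySem.Dict.keys_empty] using this
  have hndA : (pairs.foldl pvStepA PySem.Dict.empty).keys.Nodup := by
    exact PySem.Dict.nodup_keys_foldl_insert_key pairs (fun p : String × String => p.1)
      (fun d p => PySem.Set.add (d.getD p.1 PySem.Set.empty) p.2) PySem.Dict.empty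
      (by simp [PySem.Dict.keys_empty])
  have hndB : (pairs.foldl (fun d p => d.insert p.1 (g p.1)) PySem.Dict.empty).keys.Nodup := by
    exact PySem.Dict.nodup_keys_foldl_insert_key pairs (fun p : String × String => p.1)
      (fun d p => g p.1) PySem.Dict.empty (by simp [PySem.Dict.keys_empty])
  rw [PySem.Dict.items_eq_map_keys _ hndA PySem.Set.empty,
      PySem.Dict.items_eq_map_keys _ hndB PySem.Set.empty, hkA, hkB]
  apply List.map_congr_left
  intro k hk
  have hkmem : k ∈ pairs.map (·.1) := by
    simpa [PySem.Set.mem_ofList] using hk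
  rw [pvA_getD pairs PySem.Dict.empty k, pvB_getD g pairs PySem.Dict.empty k]
  simp [hkmem, hg, PySem.Set.update, PySem.Set.ofList, PySem.Dict.getD_empty, PySem.Set.empty]
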